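-- pv_equiv track=rewrite | github.com/thehalleyyoung/deppy | deppy/lean/body_translation.py | _is_set_like
-- ===== SOURCE A (Python) =====
-- def _is_set_like(t: str) -> bool:
--     if not t:
--         return False
--     for prefix in ("set", "Set", "frozenset", "FrozenSet",
--                    "MutableSet"):
--         if t == prefix or t.startswith(prefix + "["):
--             return True
--     return False
-- ===== SOURCE B (Python) =====
-- _SET_BASES = {"set", "Set", "frozenset", "FrozenSet", "MutableSet"}
--
--
-- def _is_set_like(t: str) -> bool:
--     # The name before the first '[' (or the whole string) is the base type.
--     return t.split("[", 1)[0] in _SET_BASES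
-- ===== Notes on version B (the rewrite author's own statement) =====
-- stated objective: simpler
-- what changed: Replaced the per-prefix loop of equality/startswith checks by computing the base name once with a single split at the first '[' and one membership test.
import Mathlib
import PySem

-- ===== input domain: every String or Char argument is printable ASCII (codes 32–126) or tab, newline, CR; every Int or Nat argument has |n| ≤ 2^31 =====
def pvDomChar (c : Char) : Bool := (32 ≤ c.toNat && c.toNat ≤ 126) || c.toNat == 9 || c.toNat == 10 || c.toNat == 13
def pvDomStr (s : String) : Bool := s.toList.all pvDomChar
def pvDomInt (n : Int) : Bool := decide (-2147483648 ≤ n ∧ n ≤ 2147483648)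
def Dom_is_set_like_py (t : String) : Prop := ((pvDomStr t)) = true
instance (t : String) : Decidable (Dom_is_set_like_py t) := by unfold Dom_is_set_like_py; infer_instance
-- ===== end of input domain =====

-- B computes the base type name once via split('[', 1)[0] and a single membership
-- test, replacing A's per-prefix equality/startswith loop (objective: simpler).


-- ===== PORT A =====
-- A's tuple of candidate prefixes
def pvSetPrefixes : List String := ["set", "Set", "frozenset", "FrozenSet", "MutableSet"]

-- A's for-loop over the prefixes with its early 'return True'
def pvPrefixLoop (t : String) : List String → Bool
  | [] => false
  | p :: ps =>
    if t == p || PySem.Str.startswith t (String.ofList (p.toList ++ ['['])) then true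
    else pvPrefixLoop t ps

def is_set_like_py (t : String) : Bool :=
  if t == "" then false else pvPrefixLoop t pvSetPrefixes

-- ===== PORT B =====
-- B's set of base type names
def pvSetBases : List String := ["set", "Set", "frozenset", "FrozenSet", "MutableSet"]

-- t.split('[', 1)[0] in _SET_BASES  (split with a nonempty sep always returns a
-- nonempty list, so the [0] indexing is total: headD's defaults are never reached)
def is_set_like_py_alt (t : String) : Bool :=
  decide ((((PySem.Str.splitMax? t "[" 1).getD []).headD "") ∈ pvSetBases)

-- ===== PRECONDITION & SPEC =====
def Spec_is_set_like_py (t : String) (out : Bool) : Prop := out = is_set_like_py_alt t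
instance (t : String) (out : Bool) : Decidable (Spec_is_set_like_py t out) := by unfold Spec_is_set_like_py; infer_instance

-- ===== CLAIM (what is proved, stated in full; the proofs are below) =====
def Claim_equal_is_set_like_py : Prop := ∀ (t : String), Dom_is_set_like_py t → Spec_is_set_like_py t (is_set_like_py t)

-- ===== LEMMAS AND PROOFS =====

-- once a piece has been pushed onto the (initially empty) accumulator it stays the
-- last element, hence the head of the reversed result
theorem pv_go_head_acc (sep : List Char) (x : List Char) :
    ∀ (fuel m : Nat) (l cur : List Char) (acc : List (List Char)),
    (PySem.Chars.splitOnMax.go sep fuel m l cur (acc ++ [x])).headD [] = x := by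
  intro fuel
  induction fuel with
  | zero =>
    intro m l cur acc
    simp [PySem.Chars.splitOnMax.go, List.reverse_append]
  | succ f ih =>
    intro m l cur acc
    cases l with
    | nil => simp [PySem.Chars.splitOnMax.go, List.reverse_append]
    | cons c rest =>
      rw [PySem.Chars.splitOnMax.go]
      by_cases hm : m = 0
      · simp [hm, List.reverse_append]
      · simp only [hm, if_false]
        by_cases hp : sep.isPrefixOf (c :: rest)
        · simp only [hp, if_true]
          exact ih _ _ _ (_ :: acc)
        · simp only [hp]
          exact ih _ _ _ acc

-- the first piece of split('[', 1) is the longest '['-free prefix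
theorem pv_go_head (fuel : Nat) :
    ∀ (l cur : List Char), l.length ≤ fuel →
    (PySem.Chars.splitOnMax.go ['['] fuel 1 l cur []).headD [] =
      cur.reverse ++ l.takeWhile (· ≠ '[') := by
  induction fuel with
  | zero =>
    intro l cur h
    have : l = [] := List.eq_nil_of_length_eq_zero (Nat.le_zero.mp h)
    subst this
    simp [PySem.Chars.splitOnMax.go]
  | succ f ih =>
    intro l cur h
    cases l with
    | nil => simp [PySem.Chars.splitOnMax.go]
    | cons c rest =>
      rw [PySem.Chars.splitOnMax.go]
      by_cases hc : c = '['
      · subst hc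
        have hp : List.isPrefixOf ['['] ('[' :: rest) = true := by simp [List.isPrefixOf]
        simp only [hp, if_true, one_ne_zero, if_false]
        have := pv_go_head_acc ['['] cur.reverse f 0 (List.drop 1 ('[' :: rest)) [] []
        simpa [List.takeWhile] using this
      · have hp : List.isPrefixOf ['['] (c :: rest) = false := by
          simp [List.isPrefixOf]; exact fun h' => hc h'.symm
        simp only [hp, Bool.false_eq_true, if_false, one_ne_zero]
        rw [ih rest (c :: cur) (by simpa using Nat.le_of_succ_le_succ h)]
        simp [List.takeWhile, hc]

-- a string's '['-free prefix equals p (itself '['-free) iff the string is p or starts with p ++ "["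
theorem pv_takeWhile_eq_iff (l p : List Char) (hp : '[' ∉ p) :
    l.takeWhile (· ≠ '[') = p ↔ (l = p ∨ (p ++ ['[']) <+: l) := by
  constructor
  · intro h
    have hsplit := List.takeWhile_append_dropWhile (p := fun x => decide (x ≠ '[')) (l := l)
    rcases hd : l.dropWhile (fun x => decide (x ≠ '[')) with _ | ⟨c, rest⟩
    · left; rw [← hsplit, hd, h]; simp
    · right
      have hne : l.dropWhile (fun x => decide (x ≠ '[')) ≠ [] := by
        rw [hd]; exact List.cons_ne_nil c rest
      have h1 := List.head_dropWhile_not _ hne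
      have h2 : (l.dropWhile (fun x => decide (x ≠ '['))).head? = some c := by rw [hd]; rfl
      rw [List.head?_eq_some_head hne] at h2
      rw [Option.some.inj h2] at h1
      have hc' : c = '[' := by simpa using h1
      refine ⟨rest, ?_⟩
      rw [← hsplit, hd, h, hc']
      simp
  · rintro (rfl | ⟨rest, rfl⟩)
    · rw [List.takeWhile_eq_self_iff]
      intro a ha
      simp only [decide_eq_true_eq, ne_eq]
      rintro rfl; exact hp ha
    · rw [List.append_assoc, List.takeWhile_append]
      have hall : p.takeWhile (fun x => decide (x ≠ '[')) = p := by
        rw [List.takeWhile_eq_self_iff]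
        intro a ha
        simp only [decide_eq_true_eq, ne_eq]
        rintro rfl; exact hp ha
      simp only [ne_eq, decide_not] at hall
      simp [hall]

theorem pv_headD_map {α β : Type} (f : List α → β) (L : List (List α)) :
    (L.map f).headD (f []) = f (L.headD []) := by
  cases L <;> rfl

-- B as a takeWhile: split('[', 1)[0] is the longest '['-free prefix of t
theorem pv_alt_eq (t : String) :
    is_set_like_py_alt t =
      decide (String.ofList (t.toList.takeWhile (· ≠ '[')) ∈ pvSetBases) := by
  unfold is_set_like_py_alt
  rw [PySem.Str.splitMax?]
  rw [PySem.Chars.splitMax?]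
  simp only [show ("[".toList.isEmpty) = false from rfl, Bool.false_eq_true, if_false,
    Option.map_some, Option.getD_some]
  have hof : ("" : String) = String.ofList [] := rfl
  rw [hof, pv_headD_map String.ofList (PySem.Chars.splitOnMax t.toList "[".toList 1)]
  rw [PySem.Chars.splitOnMax]
  have h1 : ¬ ((1 : Int) < 0) := by decide
  simp only [h1, if_false, Int.toNat_one]
  have hb : "[".toList = ['['] := rfl
  rw [hb]
  have := pv_go_head (t.toList.length + 1) t.toList [] (Nat.le_succ _)
  simp only [List.reverse_nil, List.nil_append] at this
  rw [this]

-- one iteration of A's loop decides exactly 'the '['-free prefix of t equals p'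
theorem pv_prefix_case (t p : String) (hp : '[' ∉ p.toList) :
    (t == p || PySem.Str.startswith t (String.ofList (p.toList ++ ['[']))) =
    decide (String.ofList (t.toList.takeWhile (· ≠ '[')) = p) := by
  rw [Bool.eq_iff_iff]
  simp only [Bool.or_eq_true, beq_iff_eq, decide_eq_true_eq, PySem.Str.startswith,
    PySem.Chars.startswith, String.toList_ofList, List.isPrefixOf_iff_prefix]
  rw [show (String.ofList (t.toList.takeWhile (· ≠ '[')) = p) ↔
      (t.toList.takeWhile (· ≠ '[') = p.toList) from by
    constructor
    · intro h; rw [← h, String.toList_ofList]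
    · intro h; rw [h]; exact String.toList_inj.mp String.toList_ofList]
  rw [pv_takeWhile_eq_iff t.toList p.toList hp]
  rw [← String.toList_inj]

theorem pv_main (t : String) : is_set_like_py t = is_set_like_py_alt t := by
  rw [pv_alt_eq]
  unfold is_set_like_py
  by_cases h0 : t = ""
  · subst h0; decide
  · rw [if_neg (by simpa using h0)]
    simp only [pvSetPrefixes, pvPrefixLoop]
    rw [pv_prefix_case t "set" (by decide), pv_prefix_case t "Set" (by decide),
        pv_prefix_case t "frozenset" (by decide), pv_prefix_case t "FrozenSet" (by decide),
        pv_prefix_case t "MutableSet" (by decide)]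
    by_cases h1 : String.ofList (t.toList.takeWhile (· ≠ '[')) = "set" <;>
    by_cases h2 : String.ofList (t.toList.takeWhile (· ≠ '[')) = "Set" <;>
    by_cases h3 : String.ofList (t.toList.takeWhile (· ≠ '[')) = "frozenset" <;>
    by_cases h4 : String.ofList (t.toList.takeWhile (· ≠ '[')) = "FrozenSet" <;>
    by_cases h5 : String.ofList (t.toList.takeWhile (· ≠ '[')) = "MutableSet" <;>
    simp [pvSetBases, h1, h2, h3, h4, h5]

-- ===== VERDICT (by name: the statement is the Claim_ definition above) =====
theorem is_set_like_py_spec : Claim_equal_is_set_like_py := by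
  intro t _
  exact pv_main t
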